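-- pv_equiv track=rewrite | github.com/internetarchive/openlibrary | openlibrary/plugins/upstream/utils.py | get_location_and_publisher
-- ===== SOURCE A (Python) =====
-- STRIP_CHARS = ",'\" "
--
-- REPLACE_CHARS = "]["
--
-- def get_colon_only_loc_pub(pair: str) -> tuple[str, str]:
--     """
--     Get a tuple of a location and publisher name from an Internet Archive
--     publisher string. For use in simple location-publisher pairs with one colon.
--
--     >>> get_colon_only_loc_pub('City : Publisher Name')
--     ('City', 'Publisher Name')
--     """
--     pairs = pair.split(":")
--     if len(pairs) == 2:
--         location = pairs[0].strip(STRIP_CHARS)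
--         publisher = pairs[1].strip(STRIP_CHARS)
--
--         return (location, publisher)
--
--     # Fall back to using the entire string as the publisher.
--     return ("", pair.strip(STRIP_CHARS))
--
-- def get_location_and_publisher(loc_pub: str) -> tuple[list[str], list[str]]:
--     """
--     Parses locations and publisher names out of Internet Archive metadata
--     `publisher` strings. For use when there is no MARC record.
--
--     Returns a tuple of list[location_strings], list[publisher_strings].
--
--     E.g.
--     >>> get_location_and_publisher("[New York] : Random House")
--     (['New York'], ['Random House'])
--     >>> get_location_and_publisher("Londres ; New York ; Paris : Berlitz Publishing")
--     (['Londres', 'New York', 'Paris'], ['Berlitz Publishing'])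
--     >>> get_location_and_publisher("Paris : Pearson ; San Jose (Calif.) : Adobe")
--     (['Paris', 'San Jose (Calif.)'], ['Pearson', 'Adobe'])
--     """
--
--     if not loc_pub or not isinstance(loc_pub, str):
--         return ([], [])
--
--     if "Place of publication not identified" in loc_pub:
--         loc_pub = loc_pub.replace("Place of publication not identified", "")
--
--     loc_pub = loc_pub.translate({ord(char): None for char in REPLACE_CHARS})
--
--     # This operates on the notion that anything, even multiple items, to the
--     # left of a colon is a location, and the item immediately to the right of
--     # the colon is a publisher. This can be exploited by using
--     # string.split(";") because everything to the 'left' of a colon is a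
--     # location, and whatever is to the right is a publisher.
--     if ":" in loc_pub:
--         locations: list[str] = []
--         publishers: list[str] = []
--         parts = loc_pub.split(";") if ";" in loc_pub else [loc_pub]
--         # Track in indices of values placed into locations or publishers.
--         last_placed_index = 0
--
--         # For each part, look for a semi-colon, then extract everything to
--         # the left as a location, and the item on the right as a publisher.
--         for index, part in enumerate(parts):
--             # This expects one colon per part. Two colons breaks our pattern.
--             # Breaking here gives the chance of extracting a
--             # `location : publisher` from one or more pairs with one semi-colon.
--             if part.count(":") > 1:
--                 break
--
--             # Per the pattern, anything "left" of a colon in a part is a place.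
--             if ":" in part:
--                 location, publisher = get_colon_only_loc_pub(part)
--                 publishers.append(publisher)
--                 # Every index value between last_placed_index and the current
--                 # index is a location.
--                 for place in parts[last_placed_index:index]:
--                     locations.append(place.strip(STRIP_CHARS))
--                 locations.append(location)  # Preserve location order.
--                 last_placed_index = index + 1
--
--         # Clean up and empty list items left over from strip() string replacement.
--         locations = [item for item in locations if item]
--         publishers = [item for item in publishers if item]
--
--         return (locations, publishers)
--
--     # Fall back to making the input a list returning that and an empty location.
--     return ([], [loc_pub.strip(STRIP_CHARS)])
-- ===== SOURCE B (Python) =====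
-- STRIP_CHARS = ",'\" "
--
-- REPLACE_CHARS = "]["
--
--
-- def get_location_and_publisher(loc_pub: str) -> tuple[list[str], list[str]]:
--     if not loc_pub:
--         return ([], [])
--
--     loc_pub = loc_pub.replace("Place of publication not identified", "")
--     loc_pub = "".join(c for c in loc_pub if c not in REPLACE_CHARS)
--
--     if ":" not in loc_pub:
--         return ([], [loc_pub.strip(STRIP_CHARS)])
--
--     # Keep only the semicolon-parts before the first part holding more than one
--     # colon, re-join them and re-split on the colons: each colon both ends a
--     # location group and starts a publisher, so the segment boundaries do all
--     # the bookkeeping.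
--     parts = loc_pub.split(";")
--     cut = next((i for i, p in enumerate(parts) if p.count(":") > 1), len(parts))
--     segs = ";".join(parts[:cut]).split(":")
--
--     # Segment i (except the last) lists locations, its first semicolon-piece
--     # being the previous publisher for i >= 1; every non-initial segment starts
--     # with a publisher.
--     locations = [
--         s
--         for i in range(len(segs) - 1)
--         for s in (p.strip(STRIP_CHARS) for p in segs[i].split(";")[(1 if i else 0):])
--         if s
--     ]
--     publishers = [
--         s for seg in segs[1:] for s in [seg.split(";")[0].strip(STRIP_CHARS)] if s
--     ]
--     return (locations, publishers)
-- ===== Notes on version B (the rewrite author's own statement) =====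
-- stated objective: alternative
-- what changed: Instead of A's stateful loop over enumerate(parts) with a last_placed_index and re-slicing parts[last_placed_index:index], B truncates the part list at the first multi-colon part, re-joins it on semicolons and re-splits it on colons so the colon segment boundaries encode the grouping, then reads locations and publishers off the segments with two index-free comprehensions; the not-identified removal is unconditional and the no-colon fallback is an early return.
import Mathlib
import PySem

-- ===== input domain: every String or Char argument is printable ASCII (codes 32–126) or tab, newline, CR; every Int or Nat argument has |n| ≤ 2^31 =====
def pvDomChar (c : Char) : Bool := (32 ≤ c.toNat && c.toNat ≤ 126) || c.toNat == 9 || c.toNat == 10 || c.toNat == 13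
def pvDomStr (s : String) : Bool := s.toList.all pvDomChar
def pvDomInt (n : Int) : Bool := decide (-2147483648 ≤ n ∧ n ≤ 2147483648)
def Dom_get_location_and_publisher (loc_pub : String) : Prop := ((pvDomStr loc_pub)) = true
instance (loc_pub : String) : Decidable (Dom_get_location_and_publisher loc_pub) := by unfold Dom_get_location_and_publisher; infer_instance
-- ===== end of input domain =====

-- B replaces A's stateful index loop (enumerate, last_placed_index, re-slicing parts) by a
-- re-join/re-split pipeline: it cuts the part list at the first multi-colon part, re-joins it on
-- semicolons and re-splits it on colons, so the colon segment boundaries do all the grouping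
-- (objective: alternative).

-- ===== PORT A =====

-- ".strip(STRIP_CHARS)" with STRIP_CHARS = ",'\" ", used by both Pythons
def pvStrip (s : String) : String := PySem.Str.stripChars s ",'\" "

-- str.split(sep) with a nonempty sep, used by both Pythons
def pySplit (s : String) (sep : String) : List String :=
  (PySem.Chars.splitOn s.toList sep.toList).map String.ofList

-- helper get_colon_only_loc_pub of A
def get_colon_only_loc_pub (pair : String) : String × String :=
  let pairs := pySplit pair ":"
  if pairs.length = 2 then
    (pvStrip (pairs.getD 0 ""), pvStrip (pairs.getD 1 ""))
  else
    ("", pvStrip pair)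

-- A's pre-cleaning: the guarded removal of "Place of publication not identified", then
-- str.translate deleting the chars of REPLACE_CHARS = "][" (exact as a filter)
def cleanA (loc_pub : String) : String :=
  let s1 := if PySem.Str.isIn "Place of publication not identified" loc_pub then
      PySem.Str.replace loc_pub "Place of publication not identified" "" else loc_pub
  String.ofList (s1.toList.filter (fun c => !("][".toList.contains c)))

-- A's for-loop over enumerate(parts) with break; state: index, last_placed_index, locations, publishers
def loopA (parts : List String) : List String → Nat → Nat → List String → List String →
    List String × List String
  | [], _, _, locs, pubs => (locs, pubs)
  | part :: rest, index, last, locs, pubs =>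
    if PySem.Str.count part ":" > 1 then (locs, pubs)  -- break
    else if PySem.Str.isIn ":" part then
      let lp := get_colon_only_loc_pub part
      loopA parts rest (index + 1) (index + 1)
        ((locs ++ (PySem.List.slice parts (some (last : Int)) (some (index : Int))).map
            (fun place => pvStrip place)) ++ [lp.1])
        (pubs ++ [lp.2])
    else loopA parts rest (index + 1) last locs pubs

-- A's body after the pre-cleaning
def tailA (s2 : String) : List String × List String :=
  if PySem.Str.isIn ":" s2 then
    let parts := if PySem.Str.isIn ";" s2 then pySplit s2 ";" else [s2]
    let r := loopA parts parts 0 0 [] []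
    (r.1.filter (fun item => item != ""), r.2.filter (fun item => item != ""))
  else
    ([], [pvStrip s2])

def get_location_and_publisher (loc_pub : String) : List String × List String :=
  if loc_pub = "" then ([], [])  -- 'not loc_pub'
  else tailA (cleanA loc_pub)

-- ===== PORT B =====

-- B's pre-cleaning: unconditional replace, then ''.join(c for c in loc_pub if c not in REPLACE_CHARS)
def cleanB (loc_pub : String) : String :=
  let s1 := PySem.Str.replace loc_pub "Place of publication not identified" ""
  String.ofList (s1.toList.filter (fun c => !("][".toList.contains c)))

-- B's body after the pre-cleaning: cut at the first multi-colon part, re-join on semicolons,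
-- re-split on colons, then read locations and publishers off the colon segments
def tailB (s2 : String) : List String × List String :=
  if !(PySem.Str.isIn ":" s2) then
    ([], [pvStrip s2])
  else
    let parts := pySplit s2 ";"
    -- cut = next((i for i, p in enumerate(parts) if p.count(":") > 1), len(parts))
    let cut := match parts.findIdx? (fun p => decide (PySem.Str.count p ":" > 1)) with
      | some i => i
      | none => parts.length
    -- segs = ";".join(parts[:cut]).split(":")
    let segs := pySplit (PySem.Str.join ";" (parts.take cut)) ":"
    -- locations: per non-final segment, strip its semicolon-pieces (skipping the leading
    -- publisher piece on every segment but the first), keep the non-empty ones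
    let locations := (List.range (segs.length - 1)).flatMap (fun i =>
      (((pySplit (segs.getD i "") ";").drop (if i = 0 then 0 else 1)).map pvStrip).filter
        (fun x => x != ""))
    -- publishers: the first semicolon-piece of every segment after a colon, stripped, non-empty
    let publishers := (segs.drop 1).flatMap (fun seg =>
      [pvStrip ((pySplit seg ";").getD 0 "")].filter (fun x => x != ""))
    (locations, publishers)

def get_location_and_publisher_alt (loc_pub : String) : List String × List String :=
  if loc_pub = "" then ([], [])
  else tailB (cleanB loc_pub)

-- ===== PRECONDITION & SPEC =====
def Spec_get_location_and_publisher (loc_pub : String) (out : List String × List String) : Prop := out = get_location_and_publisher_alt loc_pub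
instance (loc_pub : String) (out : List String × List String) : Decidable (Spec_get_location_and_publisher loc_pub out) := by unfold Spec_get_location_and_publisher; infer_instance

-- ===== CLAIM (what is proved, stated in full; the proofs are below) =====
def Claim_equal_get_location_and_publisher : Prop := ∀ (loc_pub : String), Dom_get_location_and_publisher loc_pub → Spec_get_location_and_publisher loc_pub (get_location_and_publisher loc_pub)

-- ===== LEMMAS AND PROOFS =====

-- ---------- proof-side vocabulary ----------

def filtNE (l : List String) : List String := l.filter (fun x => x != "")

def stripC (cs : List Char) : String := pvStrip (String.ofList cs)

def stripF (L : List (List Char)) : List String := filtNE (L.map stripC)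

-- semicolon-join on the char level, by structural equations
def joinSemi : List String → List Char
  | [] => []
  | [x] => x.toList
  | x :: xs@(_ :: _) => x.toList ++ ';' :: joinSemi xs

def pcs (cs : List Char) : List (List Char) := cs.splitOn ';'

def SC (q : List String) : List (List Char) := (joinSemi q).splitOn ':'

-- B's reading of a segment list, structurally
def locsOf : List (List Char) → List String
  | s0 :: tl@(_ :: _) => stripF (pcs s0) ++ tl.dropLast.flatMap (fun s => stripF ((pcs s).drop 1))
  | _ => []

def pubsOf (sg : List (List Char)) : List String :=
  (sg.drop 1).flatMap (fun s => filtNE [stripC ((pcs s).getD 0 [])])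

def filters (r : List String × List String) : List String × List String :=
  (filtNE r.1, filtNE r.2)

-- the pending-buffer reformulation of A's loop (proof intermediate)
def bufLoop : List String → List String → List String → List String → List String × List String
  | [], _, locs, pubs => (locs, pubs)
  | part :: rest, pending, locs, pubs =>
    if PySem.Str.count part ":" > 1 then (locs, pubs)  -- break
    else if PySem.Str.isIn ":" part then
      bufLoop rest [] ((locs ++ pending.map (fun p => pvStrip p)) ++ [(get_colon_only_loc_pub part).1])
        (pubs ++ [(get_colon_only_loc_pub part).2])
    else bufLoop rest (pending ++ [part]) locs pubs

def cutOf (q : List String) : Nat :=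
  match q.findIdx? (fun p => decide (PySem.Str.count p ":" > 1)) with
  | some i => i
  | none => q.length

-- ---------- facts about List.splitOn on a single separator ----------

lemma spn_nil (c : Char) : List.splitOn c ([] : List Char) = [[]] := by
  simp [List.splitOn]

lemma spn_cons_self (c : Char) (b : List Char) :
    List.splitOn c (c :: b) = [] :: List.splitOn c b := by
  simp [List.splitOn, List.splitOnP_cons]

lemma spn_cons_ne {x c : Char} (h : x ≠ c) (b : List Char) :
    List.splitOn c (x :: b) = List.modifyHead (x :: ·) (List.splitOn c b) := by
  simp [List.splitOn, List.splitOnP_cons, h]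

lemma spn_ne_nil (c : Char) (cs : List Char) : List.splitOn c cs ≠ [] := by
  induction cs with
  | nil => simp
  | cons x t ih =>
    by_cases hx : x = c
    · subst hx; rw [spn_cons_self]; simp
    · rw [spn_cons_ne hx]
      cases hsp : t.splitOn c with
      | nil => exact absurd hsp ih
      | cons h0 tl0 => simp

lemma spn_append_nc {c : Char} {a : List Char} (h : c ∉ a) (b : List Char) :
    List.splitOn c (a ++ b) = List.modifyHead (a ++ ·) (List.splitOn c b) := by
  induction a with
  | nil =>
    simp only [List.nil_append]
    cases hsp : b.splitOn c with
    | nil => exact absurd hsp (spn_ne_nil c b)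
    | cons h0 tl0 => simp
  | cons x t ih =>
    have hx : x ≠ c := fun hx => h (by simp [hx])
    have ht : c ∉ t := fun hm => h (by simp [hm])
    rw [List.cons_append, spn_cons_ne hx, ih ht, List.modifyHead_modifyHead]
    rfl

lemma spn_nc {c : Char} {a : List Char} (h : c ∉ a) : List.splitOn c a = [a] := by
  have := spn_append_nc h []
  simpa [spn_nil] using this

lemma spn_mid {c : Char} {a : List Char} (h : c ∉ a) (b : List Char) :
    List.splitOn c (a ++ c :: b) = a :: List.splitOn c b := by
  rw [spn_append_nc h, spn_cons_self]
  simp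

lemma spn_mem {c : Char} {cs piece : List Char} (h : piece ∈ List.splitOn c cs) : c ∉ piece := by
  induction cs generalizing piece with
  | nil =>
    rw [spn_nil] at h
    simp at h
    simp [h]
  | cons x t ih =>
    by_cases hx : x = c
    · subst hx
      rw [spn_cons_self] at h
      rcases List.mem_cons.mp h with h | h
      · simp [h]
      · exact ih h
    · rw [spn_cons_ne hx] at h
      cases hsp : t.splitOn c with
      | nil => exact absurd hsp (spn_ne_nil c t)
      | cons h0 tl0 =>
        rw [hsp] at h
        rcases List.mem_cons.mp h with h | h
        · subst h
          intro hm
          rcases List.mem_cons.mp hm with hm | hm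
          · exact hx hm.symm
          · exact ih (hsp ▸ List.mem_cons_self) hm
        · exact ih (hsp ▸ List.mem_cons_of_mem _ h)

-- ---------- bridges from PySem primitives to Mathlib's splitOn / count ----------

lemma count_go_singleton (c : Char) :
    ∀ (fuel : Nat) (l : List Char) (acc : Nat), l.length ≤ fuel →
      PySem.Chars.count.go [c] fuel l acc = acc + l.count c := by
  intro fuel
  induction fuel with
  | zero =>
    intro l acc h
    have hl : l = [] := by cases l with | nil => rfl | cons x t => simp at h
    subst hl
    rw [PySem.Chars.count.go]
    simp
  | succ n ih =>
    intro l acc h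
    cases l with
    | nil =>
      rw [PySem.Chars.count.go]
      simp
      omega
    | cons x t =>
      rw [PySem.Chars.count.go]
      by_cases hx : c = x
      · subst hx
        have hpre : List.isPrefixOf [c] (c :: t) = true := by
          simp [List.isPrefixOf]
        rw [hpre]
        simp only [if_true]
        have : List.drop [c].length (c :: t) = t := by simp
        rw [this, ih t (acc + 1) (by simpa using Nat.le_of_succ_le_succ h)]
        simp
        omega
      · have hpre : List.isPrefixOf [c] (x :: t) = false := by
          simp [List.isPrefixOf]
          exact fun hcx => absurd hcx hx
        rw [hpre]
        simp only [Bool.false_eq_true, if_false]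
        rw [ih t acc (by simpa using Nat.le_of_succ_le_succ h)]
        simp [List.count_cons]
        intro hxc
        exact absurd hxc.symm hx

lemma countBridge (cs : List Char) (c : Char) : PySem.Chars.count cs [c] = cs.count c := by
  unfold PySem.Chars.count
  rw [if_neg (by simp)]
  simpa using count_go_singleton c cs.length cs 0 (le_refl _)

lemma split_go_singleton (c : Char) :
    ∀ (l : List Char) (fuel : Nat) (cur : List Char) (acc : List (List Char)), l.length < fuel →
      PySem.Chars.splitOn.go [c] fuel l cur acc
        = acc.reverse ++ List.modifyHead (cur.reverse ++ ·) (l.splitOn c) := by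
  intro l
  induction l with
  | nil =>
    intro fuel cur acc h
    cases fuel with
    | zero => omega
    | succ n =>
      rw [PySem.Chars.splitOn.go]
      simp
      omega
  | cons x t ih =>
    intro fuel cur acc h
    cases fuel with
    | zero => omega
    | succ n =>
      rw [PySem.Chars.splitOn.go]
      by_cases hx : x = c
      · subst hx
        have hpre : List.isPrefixOf [x] (x :: t) = true := by simp [List.isPrefixOf]
        rw [hpre]
        simp only [if_true]
        have hdrop : List.drop [x].length (x :: t) = t := by simp
        rw [hdrop, ih n [] (cur.reverse :: acc) (by simpa using Nat.lt_of_succ_lt_succ h)]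
        rw [spn_cons_self]
        cases hsp : t.splitOn x with
        | nil => exact absurd hsp (spn_ne_nil x t)
        | cons h0 tl0 => simp
      · have hpre : List.isPrefixOf [c] (x :: t) = false := by
          simp [List.isPrefixOf]
          exact fun hcx => absurd hcx.symm hx
        rw [hpre]
        simp only [Bool.false_eq_true, if_false]
        rw [ih n (x :: cur) acc (by simpa using Nat.lt_of_succ_lt_succ h)]
        rw [spn_cons_ne hx, List.modifyHead_modifyHead]
        cases hsp : t.splitOn c with
        | nil => exact absurd hsp (spn_ne_nil c t)
        | cons h0 tl0 => simp

lemma splitBridge (cs : List Char) (c : Char) : PySem.Chars.splitOn cs [c] = cs.splitOn c := by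
  unfold PySem.Chars.splitOn
  rw [split_go_singleton c cs (cs.length + 1) [] [] (by omega)]
  cases hsp : cs.splitOn c with
  | nil => exact absurd hsp (spn_ne_nil c cs)
  | cons h0 tl0 => simp

lemma isInBridge (s : String) (c : Char) :
    PySem.Str.isIn (String.ofList [c]) s = true ↔ c ∈ s.toList := by
  rw [PySem.Str.isIn_iff_infix]
  constructor
  · intro h
    exact h.subset (by simp)
  · intro h
    obtain ⟨l, r, he⟩ := List.append_of_mem h
    rw [String.toList_ofList, he]
    exact ⟨l, r, by simp⟩

-- first occurrence decomposition
lemma first_occ {c : Char} {cs : List Char} (h : c ∈ cs) :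
    ∃ l r, cs = l ++ c :: r ∧ c ∉ l := by
  induction cs with
  | nil => simp at h
  | cons x t ih =>
    by_cases hx : x = c
    · exact ⟨[], t, by simp [hx], by simp⟩
    · have hc : c ∈ t := by
        rcases List.mem_cons.mp h with h | h
        · exact absurd h.symm hx
        · exact h
      obtain ⟨l, r, he, hnl⟩ := ih hc
      exact ⟨x :: l, r, by simp [he], by
        intro hm
        rcases List.mem_cons.mp hm with hm | hm
        · exact hx hm.symm
        · exact hnl hm⟩

lemma once_decomp {c : Char} {cs : List Char} (h1 : cs.count c ≤ 1) (h : c ∈ cs) :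
    ∃ l r, cs = l ++ c :: r ∧ c ∉ l ∧ c ∉ r := by
  obtain ⟨l, r, he, hnl⟩ := first_occ h
  refine ⟨l, r, he, hnl, ?_⟩
  have : r.count c = 0 := by
    rw [he] at h1
    simp [List.count_append] at h1
    omega
  exact List.count_eq_zero.mp this

-- ---------- joinSemi structure ----------

lemma joinSemi_cons (x : String) (xs : List String) (h : xs ≠ []) :
    joinSemi (x :: xs) = x.toList ++ ';' :: joinSemi xs := by
  cases xs with
  | nil => exact absurd rfl h
  | cons y ys => simp [joinSemi]

lemma JA (y : String) (ys : List String) : ∀ (xs : List String),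
    joinSemi (xs ++ y :: ys)
      = joinSemi (xs ++ [y]) ++ (if ys.isEmpty then [] else ';' :: joinSemi ys) := by
  intro xs
  induction xs with
  | nil =>
    cases ys with
    | nil => simp [joinSemi]
    | cons z zs =>
      rw [List.nil_append, joinSemi_cons y (z :: zs) (by simp)]
      simp [joinSemi]
  | cons x xs ih =>
    rw [List.cons_append, joinSemi_cons x (xs ++ y :: ys) (by simp),
      List.cons_append, joinSemi_cons x (xs ++ [y]) (by simp), ih]
    simp

lemma JB {p : String} {l r : List Char} (hp : p.toList = l ++ ':' :: r) : ∀ (xs : List String),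
    joinSemi (xs ++ [p]) = joinSemi (xs ++ [String.ofList l]) ++ ':' :: r := by
  intro xs
  induction xs with
  | nil => simp [joinSemi, hp]
  | cons x xs ih =>
    rw [List.cons_append, joinSemi_cons x (xs ++ [p]) (by simp),
      List.cons_append, joinSemi_cons x (xs ++ [String.ofList l]) (by simp), ih]
    simp

lemma JF {c : Char} (hc : c ≠ ';') : ∀ {q : List String}, (∀ p ∈ q, c ∉ p.toList) →
    c ∉ joinSemi q := by
  intro q
  induction q with
  | nil => intro _; simp [joinSemi]
  | cons x xs ih =>
    intro hq
    cases xs with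
    | nil => simpa [joinSemi] using hq x (by simp)
    | cons y ys =>
      rw [joinSemi_cons x (y :: ys) (by simp)]
      intro hm
      rcases List.mem_append.mp hm with hm | hm
      · exact hq x (by simp) hm
      · rcases List.mem_cons.mp hm with hm | hm
        · exact hc hm
        · exact ih (fun p hp => hq p (List.mem_cons_of_mem _ hp)) hm

lemma PJ : ∀ {q : List String}, q ≠ [] → (∀ p ∈ q, ';' ∉ p.toList) →
    pcs (joinSemi q) = q.map String.toList := by
  intro q
  induction q with
  | nil => intro h; exact absurd rfl h
  | cons x xs ih =>
    intro _ hq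
    cases xs with
    | nil =>
      unfold pcs
      simp only [joinSemi]
      rw [spn_nc (hq x (by simp))]
      rfl
    | cons y ys =>
      rw [joinSemi_cons x (y :: ys) (by simp)]
      unfold pcs
      rw [spn_mid (hq x (by simp))]
      have := ih (by simp) (fun p hp => hq p (List.mem_cons_of_mem _ hp))
      unfold pcs at this
      rw [this]
      rfl

-- ---------- segment-list structure of SC ----------

lemma SC_nc {q : List String} (h : ∀ p ∈ q, ':' ∉ p.toList) : SC q = [joinSemi q] := by
  unfold SC
  exact spn_nc (JF (by decide) h)

lemma SC_split {pending rest : List String} {p : String} {l r : List Char}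
    (hp : p.toList = l ++ ':' :: r)
    (hpend : ∀ x ∈ pending, ':' ∉ x.toList) (hl : ':' ∉ l) :
    SC (pending ++ p :: rest)
      = joinSemi (pending ++ [String.ofList l]) :: SC (String.ofList r :: rest) := by
  have hj : joinSemi (pending ++ p :: rest)
      = joinSemi (pending ++ [String.ofList l]) ++ ':' :: joinSemi (String.ofList r :: rest) := by
    rw [JA p rest pending, JB hp pending]
    have hr : joinSemi (String.ofList r :: rest)
        = r ++ (if rest.isEmpty then [] else ';' :: joinSemi rest) := by
      have := JA (String.ofList r) rest []
      simpa [joinSemi] using this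
    rw [hr]
    simp
  unfold SC
  rw [hj]
  exact spn_mid (JF (by decide) (by
    intro x hx
    rcases List.mem_append.mp hx with hx | hx
    · exact hpend x hx
    · rcases List.mem_singleton.mp hx with rfl
      simpa using hl)) _

lemma Rloc {r : List Char} (hr : ':' ∉ r) (hrs : ';' ∉ r) (hd : List Char) (rest : List String) :
    locsOf (hd :: SC (String.ofList r :: rest)) = stripF (pcs hd) ++ locsOf (SC rest) := by
  cases rest with
  | nil =>
    have h1 : SC [String.ofList r] = [r] := by
      unfold SC
      simp only [joinSemi, String.toList_ofList]
      exact spn_nc hr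
    have h2 : SC ([] : List String) = [[]] := by
      unfold SC
      simp [joinSemi]
    rw [h1, h2]
    simp [locsOf]
  | cons q qs =>
    have hjs : joinSemi (String.ofList r :: q :: qs) = (r ++ [';']) ++ joinSemi (q :: qs) := by
      rw [joinSemi_cons (String.ofList r) (q :: qs) (by simp)]
      simp
    cases hsc : SC (q :: qs) with
    | nil => exact absurd hsc (spn_ne_nil _ _)
    | cons s0 tl =>
      have hsplit : SC (String.ofList r :: q :: qs) = (r ++ ';' :: s0) :: tl := by
        unfold SC
        rw [hjs, spn_append_nc (by
          intro hm
          rcases List.mem_append.mp hm with hm | hm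
          · exact hr hm
          · simp at hm)]
        unfold SC at hsc
        rw [hsc]
        simp
      rw [hsplit]
      cases tl with
      | nil => simp [locsOf]
      | cons t0 tt =>
        show stripF (pcs hd) ++ ((r ++ ';' :: s0) :: t0 :: tt).dropLast.flatMap
            (fun s => stripF ((pcs s).drop 1)) = stripF (pcs hd) ++ locsOf (s0 :: t0 :: tt)
        congr 1
        rw [List.dropLast_cons_of_ne_nil (by simp), List.flatMap_cons]
        have hpcs : pcs (r ++ ';' :: s0) = r :: pcs s0 := by
          unfold pcs
          exact spn_mid hrs s0
        rw [hpcs]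
        rfl

lemma Rpub {r : List Char} (hr : ':' ∉ r) (hrs : ';' ∉ r) (hd : List Char) (rest : List String) :
    pubsOf (hd :: SC (String.ofList r :: rest)) = filtNE [stripC r] ++ pubsOf (SC rest) := by
  cases rest with
  | nil =>
    have h1 : SC [String.ofList r] = [r] := by
      unfold SC
      simp only [joinSemi, String.toList_ofList]
      exact spn_nc hr
    have h2 : SC ([] : List String) = [[]] := by
      unfold SC
      simp [joinSemi]
    rw [h1, h2]
    unfold pubsOf
    have hpcs : pcs r = [r] := spn_nc hrs
    simp [hpcs]
  | cons q qs =>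
    have hjs : joinSemi (String.ofList r :: q :: qs) = (r ++ [';']) ++ joinSemi (q :: qs) := by
      rw [joinSemi_cons (String.ofList r) (q :: qs) (by simp)]
      simp
    cases hsc : SC (q :: qs) with
    | nil => exact absurd hsc (spn_ne_nil _ _)
    | cons s0 tl =>
      have hsplit : SC (String.ofList r :: q :: qs) = (r ++ ';' :: s0) :: tl := by
        unfold SC
        rw [hjs, spn_append_nc (by
          intro hm
          rcases List.mem_append.mp hm with hm | hm
          · exact hr hm
          · simp at hm)]
        unfold SC at hsc
        rw [hsc]
        simp
      rw [hsplit]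
      unfold pubsOf
      simp only [List.drop_succ_cons, List.drop_zero, List.flatMap_cons]
      have hpcs : pcs (r ++ ';' :: s0) = r :: pcs s0 := spn_mid hrs s0
      rw [hpcs]
      rfl

-- ---------- the main loop invariant ----------

-- counting and membership of ':' in a String, via the bridges
lemma strCount_eq (p : String) : PySem.Str.count p ":" = p.toList.count ':' := by
  rw [PySem.Str.count_eq]
  exact countBridge p.toList ':'

lemma strIsInColon (p : String) : PySem.Str.isIn ":" p = true ↔ ':' ∈ p.toList := by
  have h : (":" : String) = String.ofList [':'] := rfl
  rw [h]
  exact isInBridge p ':'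

lemma strIsInSemi (p : String) : PySem.Str.isIn ";" p = true ↔ ';' ∈ p.toList := by
  have h : (";" : String) = String.ofList [';'] := rfl
  rw [h]
  exact isInBridge p ';'

-- A's colon helper on a one-colon, first-occurrence decomposition
lemma colon_helper {p : String} {l r : List Char} (hp : p.toList = l ++ ':' :: r)
    (hl : ':' ∉ l) (hr : ':' ∉ r) :
    get_colon_only_loc_pub p = (stripC l, stripC r) := by
  unfold get_colon_only_loc_pub pySplit
  have hsep : (":" : String).toList = [':'] := rfl
  rw [hsep, splitBridge, hp, spn_mid hl, spn_nc hr]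
  simp [stripC]

lemma ML : ∀ (kept : List String), (∀ p ∈ kept, PySem.Str.count p ":" ≤ 1 ∧ ';' ∉ p.toList) →
    ∀ (pending locs pubs : List String), (∀ p ∈ pending, ':' ∉ p.toList ∧ ';' ∉ p.toList) →
      filters (bufLoop kept pending locs pubs)
        = (filtNE locs ++ locsOf (SC (pending ++ kept)),
           filtNE pubs ++ pubsOf (SC (pending ++ kept))) := by
  intro kept
  induction kept with
  | nil =>
    intro _ pending locs pubs hpend
    rw [List.append_nil]
    have hsc : SC pending = [joinSemi pending] := SC_nc (fun p hp => (hpend p hp).1)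
    rw [hsc]
    unfold bufLoop filters
    simp [locsOf, pubsOf, filtNE]
  | cons p rest ih =>
    intro hkept pending locs pubs hpend
    have hp1 : PySem.Str.count p ":" ≤ 1 := (hkept p (by simp)).1
    have hps : ';' ∉ p.toList := (hkept p (by simp)).2
    unfold bufLoop
    rw [if_neg (by omega)]
    cases hin : PySem.Str.isIn ":" p with
    | false =>
      simp only [Bool.false_eq_true, if_false]
      have hrest : ∀ q ∈ rest, PySem.Str.count q ":" ≤ 1 ∧ ';' ∉ q.toList :=
        fun q hq => hkept q (List.mem_cons_of_mem _ hq)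
      have hpc : ':' ∉ p.toList := fun hm => by
        have := (strIsInColon p).mpr hm
        rw [hin] at this
        exact absurd this (by simp)
      have hpend2 : ∀ x ∈ pending ++ [p], ':' ∉ x.toList ∧ ';' ∉ x.toList := by
        intro x hx
        rcases List.mem_append.mp hx with hx | hx
        · exact hpend x hx
        · rcases List.mem_singleton.mp hx with rfl
          exact ⟨hpc, hps⟩
      have := ih hrest (pending ++ [p]) locs pubs hpend2
      rw [this]
      simp
    | true =>
      simp only [if_true]
      have hcm : ':' ∈ p.toList := (strIsInColon p).mp hin
      have hc1 : p.toList.count ':' ≤ 1 := by rw [← strCount_eq]; exact hp1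
      obtain ⟨l, r, he, hl, hr⟩ := once_decomp hc1 hcm
      have hlp := colon_helper he hl hr
      rw [hlp]
      have hlsemi : ';' ∉ l := fun hm => hps (by rw [he]; exact List.mem_append.mpr (Or.inl hm))
      have hrsemi : ';' ∉ r := fun hm => hps (by
        rw [he]
        exact List.mem_append.mpr (Or.inr (List.mem_cons_of_mem _ hm)))
      have hrest : ∀ q ∈ rest, PySem.Str.count q ":" ≤ 1 ∧ ';' ∉ q.toList :=
        fun q hq => hkept q (List.mem_cons_of_mem _ hq)
      have hih := ih hrest [] ((locs ++ pending.map (fun p => pvStrip p)) ++ [stripC l])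
        (pubs ++ [stripC r]) (by simp)
      simp only [List.nil_append] at hih
      rw [hih]
      have hsplit := SC_split (pending := pending) (rest := rest) he
        (fun x hx => (hpend x hx).1) hl
      rw [hsplit, Rloc hr hrsemi _ rest, Rpub hr hrsemi _ rest]
      have hhd : stripF (pcs (joinSemi (pending ++ [String.ofList l])))
          = filtNE (pending.map (fun p => pvStrip p) ++ [stripC l]) := by
        rw [PJ (by simp) (by
          intro x hx
          rcases List.mem_append.mp hx with hx | hx
          · exact (hpend x hx).2
          · rcases List.mem_singleton.mp hx with rfl
            simpa using hlsemi)]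
        unfold stripF
        congr 1
        simp [Function.comp_def, stripC]
      rw [hhd]
      simp [filtNE, List.filter_append, List.append_assoc]

-- ---------- A-side reductions ----------

lemma replace_go_noop (old new : List Char) :
    ∀ (fuel : Nat) (l acc : List Char), ¬ old <:+: l →
      PySem.Chars.replace.go old new fuel l acc = acc.reverse ++ l := by
  intro fuel
  induction fuel with
  | zero => intro l acc h; rw [PySem.Chars.replace.go]
  | succ n ih =>
    intro l acc h
    cases l with
    | nil => rw [PySem.Chars.replace.go]; simp; omega
    | cons c t =>
      rw [PySem.Chars.replace.go]
      have hpre : old.isPrefixOf (c :: t) = false := by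
        rw [Bool.eq_false_iff]
        intro hp
        exact h (List.IsPrefix.isInfix (List.isPrefixOf_iff_prefix.mp hp))
      rw [hpre]
      simp only [Bool.false_eq_true, if_false]
      rw [ih t (c :: acc) (fun hinf => h (hinf.trans (List.infix_cons_iff.mpr (Or.inr (List.infix_refl t)))))]
      simp

lemma replace_noop (s old new : String) (h : PySem.Str.isIn old s = false)
    (hold : old ≠ "") : PySem.Str.replace s old new = s := by
  unfold PySem.Str.replace PySem.Chars.replace
  rw [if_neg (by simpa using hold)]
  rw [replace_go_noop _ _ _ _ _ ((PySem.Chars.isIn_eq_false_iff _ _).mp h)]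
  simp

lemma clean_eq (loc_pub : String) : cleanA loc_pub = cleanB loc_pub := by
  unfold cleanA cleanB
  have hs1 : (if PySem.Str.isIn "Place of publication not identified" loc_pub = true then
      PySem.Str.replace loc_pub "Place of publication not identified" "" else loc_pub)
      = PySem.Str.replace loc_pub "Place of publication not identified" "" := by
    split
    · rfl
    · next h => exact (replace_noop _ _ _ (Bool.eq_false_iff.mpr h) (by decide)).symm
  rw [hs1]

-- A's indexed loop equals the pending-buffer loop: the buffer is the slice parts[last:index]
lemma loop_eq (parts : List String) :
    ∀ (suffix : List String) (i last : Nat) (locs pubs : List String),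
      parts.drop i = suffix → last ≤ i →
      loopA parts suffix i last locs pubs
        = bufLoop suffix ((parts.drop last).take (i - last)) locs pubs := by
  intro suffix
  induction suffix with
  | nil => intro i last locs pubs _ _; simp [loopA, bufLoop]
  | cons part rest ih =>
    intro i last locs pubs hdrop hle
    have hdrop1 : parts.drop (i + 1) = rest := by
      have : (parts.drop i).drop 1 = rest := by rw [hdrop]; rfl
      rwa [List.drop_drop] at this
    have hget : (parts.drop last)[i - last]? = some part := by
      rw [← List.head?_drop, List.drop_drop, Nat.add_sub_cancel' hle, hdrop]; rfl
    simp only [loopA, bufLoop]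
    split
    · rfl
    · split
      · rw [ih (i + 1) (i + 1) _ _ hdrop1 (le_refl _)]
        rw [PySem.List.slice_natCast]
        simp
      · rw [ih (i + 1) last _ _ hdrop1 (by omega)]
        have : i + 1 - last = (i - last) + 1 := by omega
        rw [this, List.take_add_one, hget]
        rfl

lemma loopAB (parts : List String) : loopA parts parts 0 0 [] [] = bufLoop parts [] [] [] := by
  simpa using loop_eq parts parts 0 0 [] [] rfl (le_refl 0)

-- the loop never looks past the first multi-colon part
lemma brkTake : ∀ (q : List String) (pending locs pubs : List String),
    bufLoop q pending locs pubs = bufLoop (q.take (cutOf q)) pending locs pubs := by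
  intro q
  induction q with
  | nil => intro pending locs pubs; rfl
  | cons p rest ih =>
    intro pending locs pubs
    by_cases hp : PySem.Str.count p ":" > 1
    · have hcut : cutOf (p :: rest) = 0 := by
        unfold cutOf
        rw [List.findIdx?_cons, if_pos (by simpa using hp)]
      rw [hcut, List.take_zero]
      have h1 : bufLoop (p :: rest) pending locs pubs = (locs, pubs) := by
        unfold bufLoop
        rw [if_pos hp]
      have h2 : bufLoop [] pending locs pubs = (locs, pubs) := rfl
      rw [h1, h2]
    · have hcut : cutOf (p :: rest) = cutOf rest + 1 := by
        unfold cutOf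
        rw [List.findIdx?_cons, if_neg (by simpa using hp)]
        cases rest.findIdx? (fun p => decide (PySem.Str.count p ":" > 1)) with
        | none => simp
        | some i => simp
      rw [hcut, List.take_succ_cons]
      unfold bufLoop
      rw [if_neg hp, if_neg hp]
      split
      · exact ih _ _ _
      · exact ih _ _ _

lemma keptOk : ∀ (q : List String), ∀ p ∈ q.take (cutOf q), PySem.Str.count p ":" ≤ 1 := by
  intro q
  induction q with
  | nil => intro p hp; simp at hp
  | cons x rest ih =>
    intro p hp
    by_cases hx : PySem.Str.count x ":" > 1
    · have hcut : cutOf (x :: rest) = 0 := by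
        unfold cutOf
        rw [List.findIdx?_cons, if_pos (by simpa using hx)]
      rw [hcut] at hp
      simp at hp
    · have hcut : cutOf (x :: rest) = cutOf rest + 1 := by
        unfold cutOf
        rw [List.findIdx?_cons, if_neg (by simpa using hx)]
        cases rest.findIdx? (fun p => decide (PySem.Str.count p ":" > 1)) with
        | none => simp
        | some i => simp
      rw [hcut, List.take_succ_cons] at hp
      rcases List.mem_cons.mp hp with hp | hp
      · subst hp; omega
      · exact ih p hp

lemma partsSemiFree (s : String) : ∀ p ∈ pySplit s ";", ';' ∉ p.toList := by
  intro p hp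
  unfold pySplit at hp
  have hsep : (";" : String).toList = [';'] := rfl
  rw [hsep, splitBridge] at hp
  obtain ⟨piece, hpc, rfl⟩ := List.mem_map.mp hp
  rw [String.toList_ofList]
  exact spn_mem hpc

-- ---------- B-side representation: range/getD flatMaps read back structurally ----------

lemma G {α : Type} (h : α → List String) (d : α) : ∀ (l : List α),
    (List.range (l.length - 1)).flatMap (fun i => h (l.getD i d)) = l.dropLast.flatMap h := by
  intro l
  induction l with
  | nil => simp
  | cons x t ih =>
    cases t with
    | nil => simp
    | cons y tt =>
      have hlen : (x :: y :: tt).length - 1 = ((y :: tt).length - 1) + 1 := by simp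
      rw [hlen, List.range_succ_eq_map, List.flatMap_cons, List.flatMap_map]
      rw [List.dropLast_cons_of_ne_nil (by simp), List.flatMap_cons]
      have hfun : ∀ a : Nat, h ((x :: y :: tt).getD a.succ d) = h ((y :: tt).getD a d) :=
        fun a => rfl
      simp only [hfun]
      rw [ih]
      rfl

-- B representation: the range/getD flatMap over mapped segments reads back structurally
lemma getD_map_ofList (sg : List (List Char)) (i : Nat) :
    (sg.map String.ofList).getD i "" = String.ofList (sg.getD i []) := by
  induction sg generalizing i with
  | nil => cases i <;> rfl
  | cons x t ih =>
    cases i with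
    | zero => rfl
    | succ n =>
      simp only [List.map_cons, List.getD_cons_succ]
      exact ih n

lemma pySplit_ofList (cs : List Char) : pySplit (String.ofList cs) ";" = (pcs cs).map String.ofList := by
  unfold pySplit
  have hsep : (";" : String).toList = [';'] := rfl
  rw [String.toList_ofList, hsep, splitBridge]
  rfl

lemma locsRep (sg : List (List Char)) :
    (List.range ((sg.map String.ofList).length - 1)).flatMap (fun i =>
      (((pySplit ((sg.map String.ofList).getD i "") ";").drop (if i = 0 then 0 else 1)).map
        pvStrip).filter (fun x => x != ""))
      = locsOf sg := by
  have hbody : ∀ i, (((pySplit ((sg.map String.ofList).getD i "") ";").drop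
        (if i = 0 then 0 else 1)).map pvStrip).filter (fun x => x != "")
      = stripF ((pcs (sg.getD i [])).drop (if i = 0 then 0 else 1)) := by
    intro i
    rw [getD_map_ofList, pySplit_ofList, ← List.map_drop, List.map_map]
    rfl
  simp only [hbody]
  cases sg with
  | nil => simp [locsOf]
  | cons s0 tl =>
    cases tl with
    | nil => simp [locsOf]
    | cons t0 tt =>
      have hlen : (((s0 :: t0 :: tt).map String.ofList).length - 1) = tt.length + 1 := by simp
      rw [hlen, List.range_succ_eq_map, List.flatMap_cons, List.flatMap_map]
      show stripF ((pcs s0).drop 0) ++ _ = locsOf (s0 :: t0 :: tt)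
      rw [List.drop_zero]
      show stripF (pcs s0) ++ _ = stripF (pcs s0) ++ (t0 :: tt).dropLast.flatMap
        (fun s => stripF ((pcs s).drop 1))
      congr 1
      have hstep : ∀ a : Nat, stripF ((pcs ((s0 :: t0 :: tt).getD a.succ [])).drop
            (if a.succ = 0 then 0 else 1))
          = stripF ((pcs ((t0 :: tt).getD a [])).drop 1) := by
        intro a
        simp
      simp only [hstep]
      have := G (fun cs => stripF ((pcs cs).drop 1)) ([] : List Char) (t0 :: tt)
      have hlen2 : tt.length = (t0 :: tt).length - 1 := by simp
      rw [hlen2]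
      exact this

lemma pubsRep (sg : List (List Char)) :
    ((sg.map String.ofList).drop 1).flatMap (fun seg =>
      [pvStrip ((pySplit seg ";").getD 0 "")].filter (fun x => x != ""))
      = pubsOf sg := by
  unfold pubsOf
  cases sg with
  | nil => rfl
  | cons s0 tl =>
    simp only [List.map_cons, List.drop_succ_cons, List.drop_zero]
    rw [List.flatMap_map]
    have hfun : ∀ cs, [pvStrip ((pySplit (String.ofList cs) ";").getD 0 "")].filter
          (fun x => x != "")
        = filtNE [stripC ((pcs cs).getD 0 [])] := by
      intro cs
      rw [pySplit_ofList, getD_map_ofList]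
      rfl
    simp only [hfun]

lemma joinSemi_join (q : List String) :
    (PySem.Str.join ";" q).toList = joinSemi q := by
  unfold PySem.Str.join
  rw [String.toList_ofList]
  induction q with
  | nil => simp [PySem.Chars.join_nil, joinSemi]
  | cons x xs ih =>
    cases xs with
    | nil => simp [PySem.Chars.join_singleton, joinSemi]
    | cons y ys =>
      rw [List.map_cons, List.map_cons, PySem.Chars.join_cons_cons]
      rw [List.map_cons] at ih
      rw [ih, joinSemi_cons x (y :: ys) (by simp)]
      simp

-- ===== VERDICT (by name: the statement is the Claim_ definition above) =====
theorem get_location_and_publisher_spec : Claim_equal_get_location_and_publisher := by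
  intro loc_pub _
  unfold Spec_get_location_and_publisher get_location_and_publisher get_location_and_publisher_alt
  by_cases h0 : loc_pub = ""
  · rw [if_pos h0, if_pos h0]
  · rw [if_neg h0, if_neg h0, clean_eq]
    generalize cleanB loc_pub = s2
    unfold tailA tailB
    cases hc : PySem.Str.isIn ":" s2 with
    | false =>
      rw [if_neg (by simp), if_pos (by simp)]
    | true =>
      rw [if_pos (rfl : (true : Bool) = true), if_neg (show ¬((!true) = true) by simp)]
      have hparts : (if PySem.Str.isIn ";" s2 then pySplit s2 ";" else [s2]) = pySplit s2 ";" := by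
        cases hsem : PySem.Str.isIn ";" s2 with
        | true => rw [if_pos (rfl : (true : Bool) = true)]
        | false =>
          rw [if_neg (show ¬((false : Bool) = true) by simp)]
          unfold pySplit
          have hsep : (";" : String).toList = [';'] := rfl
          rw [hsep, splitBridge, spn_nc (fun hm => by
            have := (strIsInSemi s2).mpr hm
            rw [hsem] at this
            exact absurd this (by simp))]
          simp
      have hcut : (match (pySplit s2 ";").findIdx? (fun p => decide (PySem.Str.count p ":" > 1)) with
          | some i => i
          | none => (pySplit s2 ";").length) = cutOf (pySplit s2 ";") := rfl
      have hkept : ∀ p ∈ (pySplit s2 ";").take (cutOf (pySplit s2 ";")),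
          PySem.Str.count p ":" ≤ 1 ∧ ';' ∉ p.toList :=
        fun p hp => ⟨keptOk _ p hp, partsSemiFree s2 p (List.mem_of_mem_take hp)⟩
      have hML := ML _ hkept [] [] [] (by simp)
      have hsegs : pySplit (PySem.Str.join ";"
            ((pySplit s2 ";").take (cutOf (pySplit s2 ";")))) ":"
          = (SC ((pySplit s2 ";").take (cutOf (pySplit s2 ";")))).map String.ofList := by
        unfold pySplit
        have hsep : (":" : String).toList = [':'] := rfl
        rw [hsep, splitBridge, joinSemi_join]
        rfl
      simp only [hparts, hcut, loopAB]
      rw [brkTake, hsegs, locsRep, pubsRep]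
      simpa [filters, filtNE] using hML
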